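-- pv_equiv track=rewrite | github.com/algoORgoal/big-o-brownies | 프로그래머스/4/118670. 행렬과 연산/행렬과 연산.py | solution
-- ===== SOURCE A (Python) =====
-- from collections import deque
--
-- def solution(rc, operations):
--     row_count, column_count = len(rc), len(rc[0])
--     first_column = deque([ rc[i][0] for i in range(len(rc)) ])
--     last_column = deque([ rc[i][column_count - 1] for i in range(len(rc))])
--     rows = deque([ deque(rc[i][1: column_count - 1]) for i in range(len(rc)) ])
--     for operation in operations:
--         if operation == "ShiftRow":
--             first_column.appendleft(first_column.pop())
--             last_column.appendleft(last_column.pop())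
--             rows.appendleft(rows.pop())
--         else:
--             rows[0].appendleft(first_column.popleft())
--             last_column.appendleft(rows[0].pop())
--             rows[row_count - 1].append(last_column.pop())
--             first_column.append(rows[row_count - 1].popleft())
--
--     result = [ [ first_column[i], *rows[i] ,last_column[i] ]  for i in range(row_count)]
--     return result
-- ===== SOURCE B (Python) =====
-- # Alternative: plain 2D-list representation; ShiftRow rotates the row list,
-- # Rotate rebuilds the boundary frame positionally from the old matrix.
-- def solution(rc, operations):
--     cc = len(rc[0])
--     M = [[row[0]] + row[1:cc - 1] + [row[cc - 1]] for row in rc]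
--     r, W = len(M), len(M[0])
--     for op in operations:
--         if op == "ShiftRow":
--             M = [M[-1]] + M[:-1]
--         else:
--             top = [M[1][0]] + M[0][:W - 1]
--             bottom = M[r - 1][1:] + [M[r - 2][W - 1]]
--             mid = [[M[i + 1][0]] + M[i][1:W - 1] + [M[i - 1][W - 1]]
--                    for i in range(1, r - 1)]
--             M = [top] + mid + [bottom]
--     return M
-- ===== Notes on version B (the rewrite author's own statement) =====
-- stated objective: alternative
-- what changed: B drops A's three-deque boundary decomposition (first column / last column / middle-row deques mutated in place) and keeps a plain 2D list, rotating the row list for ShiftRow and rebuilding the top/middle/bottom rows positionally for Rotate; Pre_ excludes single-row matrices given a Rotate-type operation, where A's deque shuffle yields an accidental value (it swaps the last two entries) and B's natural frame rotation raises.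
-- outside the precondition, e.g. on solution([[1, 2, 3]], ['Rotate']): A returns [[1, 3, 2]], B raises IndexError
import Mathlib
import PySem

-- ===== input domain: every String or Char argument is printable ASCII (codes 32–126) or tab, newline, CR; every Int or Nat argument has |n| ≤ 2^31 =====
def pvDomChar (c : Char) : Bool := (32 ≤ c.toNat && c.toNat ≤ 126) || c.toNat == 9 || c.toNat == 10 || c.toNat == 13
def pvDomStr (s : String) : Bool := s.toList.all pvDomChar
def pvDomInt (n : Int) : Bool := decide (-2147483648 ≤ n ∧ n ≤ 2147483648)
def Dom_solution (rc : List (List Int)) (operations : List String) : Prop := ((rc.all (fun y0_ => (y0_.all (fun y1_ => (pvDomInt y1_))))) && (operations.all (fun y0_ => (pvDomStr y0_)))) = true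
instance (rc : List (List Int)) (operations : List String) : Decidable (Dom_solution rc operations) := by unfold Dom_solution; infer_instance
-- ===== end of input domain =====

-- B keeps the matrix as a plain 2D list and rebuilds rows positionally instead of A's
-- three-deque boundary decomposition; objective: alternative structure, not speed.

-- ===== PORT A =====
-- deque ops as list ops: appendleft = cons, pop = getLastD/dropLast, popleft = headD/tail,
-- append = ++ [x]; in-place update of rows[j] = List.set; defaults are reached only outside Pre_.
def solStepA (rowCount : Nat) (st : List Int × List Int × List (List Int)) (operation : String) :
    List Int × List Int × List (List Int) :=
  if operation == "ShiftRow" then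
    (st.1.getLastD 0 :: st.1.dropLast, st.2.1.getLastD 0 :: st.2.1.dropLast,
     st.2.2.getLastD [] :: st.2.2.dropLast)
  else
    -- rows[0].appendleft(first_column.popleft())
    let rows1 := st.2.2.set 0 (st.1.getD 0 0 :: st.2.2.getD 0 [])
    let f1 := st.1.tail
    -- last_column.appendleft(rows[0].pop())
    let row0 := rows1.getD 0 []
    let l1 := row0.getLastD 0 :: st.2.1
    let rows2 := rows1.set 0 row0.dropLast
    -- rows[row_count-1].append(last_column.pop())
    let rowN := rows2.getD (rowCount - 1) []
    let rows3 := rows2.set (rowCount - 1) (rowN ++ [l1.getLastD 0])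
    let l2 := l1.dropLast
    -- first_column.append(rows[row_count-1].popleft())
    let rowN2 := rows3.getD (rowCount - 1) []
    let f2 := f1 ++ [rowN2.getD 0 0]
    let rows4 := rows3.set (rowCount - 1) rowN2.tail
    (f2, l2, rows4)

def solution (rc : List (List Int)) (operations : List String) : List (List Int) :=
  let rowCount := rc.length
  let columnCount := (rc.getD 0 []).length
  let firstColumn := rc.map (fun row => row.getD 0 0)
  let lastColumn := rc.map (fun row => row.getD (columnCount - 1) 0)
  let rows := rc.map (fun row => PySem.List.slice row (some 1) (some ((columnCount : Int) - 1)))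
  let st := operations.foldl (solStepA rowCount) (firstColumn, lastColumn, rows)
  (List.range rowCount).map (fun i => st.1.getD i 0 :: st.2.2.getD i [] ++ [st.2.1.getD i 0])

-- ===== PORT B =====
-- Source B's Rotate: rebuild top, middle and bottom rows positionally from the old matrix.
def rotB (r W : Nat) (M : List (List Int)) : List (List Int) :=
  ((M.getD 1 []).getD 0 0 :: (M.getD 0 []).take (W - 1)) ::
    ((List.range' 1 (r - 2)).map (fun i =>
      (M.getD (i + 1) []).getD 0 0 :: ((M.getD i []).drop 1).take (W - 2)
        ++ [(M.getD (i - 1) []).getD (W - 1) 0]))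
    ++ [(M.getD (r - 1) []).tail ++ [(M.getD (r - 2) []).getD (W - 1) 0]]

def solution_alt (rc : List (List Int)) (operations : List String) : List (List Int) :=
  let cc := (rc.getD 0 []).length
  -- [row[0]] + row[1:cc-1] + [row[cc-1]]
  let M0 := rc.map (fun row => row.getD 0 0 :: (row.drop 1).take (cc - 2) ++ [row.getD (cc - 1) 0])
  let r := M0.length
  let W := (M0.getD 0 []).length
  operations.foldl
    (fun M op => if op == "ShiftRow" then M.getLastD [] :: M.dropLast else rotB r W M) M0

-- ===== PRECONDITION & SPEC =====
-- Besides the shapes on which A raises (empty matrix, empty first row, a row shorter than the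
-- first), Pre_ excludes single-row matrices given a Rotate-type operation: there A's deque
-- shuffle returns an accidental value (it swaps the row's last two entries) and B's natural
-- frame rotation raises an IndexError.
def Pre_solution (rc : List (List Int)) (operations : List String) : Prop :=
  rc ≠ [] ∧ 0 < (rc.getD 0 []).length ∧ (∀ row ∈ rc, (rc.getD 0 []).length ≤ row.length) ∧
    (2 ≤ rc.length ∨ ∀ op ∈ operations, op = "ShiftRow")
instance (rc : List (List Int)) (operations : List String) : Decidable (Pre_solution rc operations) := by
  unfold Pre_solution; infer_instance

def pvWitness_solution : List (List Int) × List String := ([[1, 2], [3, 4]], ["Rotate", "ShiftRow"])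

def Spec_solution (rc : List (List Int)) (operations : List String) (out : List (List Int)) : Prop := out = solution_alt rc operations
instance (rc : List (List Int)) (operations : List String) (out : List (List Int)) : Decidable (Spec_solution rc operations out) := by unfold Spec_solution; infer_instance

-- ===== CLAIM (what is proved, stated in full; the proofs are below) =====
def Claim_equal_solution : Prop := ∀ (rc : List (List Int)) (operations : List String), Dom_solution rc operations → Pre_solution rc operations → Spec_solution rc operations (solution rc operations)

-- ===== LEMMAS AND PROOFS =====

-- small getD/getLastD bookkeeping facts used throughout
lemma getD_zero_cons_tail {α : Type} (xs : List α) (d : α) (h : xs ≠ []) : xs.getD 0 d :: xs.tail = xs := by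
  cases xs with | nil => simp at h | cons a t => simp

lemma dropLast_concat_getLastD {α : Type} (xs : List α) (d : α) (h : xs ≠ []) :
    xs.dropLast ++ [xs.getLastD d] = xs := by
  rw [List.getLastD_eq_getLast?, List.getLast?_eq_some_getLast h]
  simp [List.dropLast_append_getLast h]

lemma getLastD_eq_getD {α : Type} (xs : List α) (n : Nat) (d e : α) (h : xs.length = n + 1) :
    xs.getLastD d = xs.getD n e := by
  have hne : xs ≠ [] := by intro h'; simp [h'] at h
  rw [List.getLastD_eq_getLast?, List.getLast?_eq_some_getLast hne, Option.getD_some,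
      List.getLast_eq_getElem, List.getD_eq_getElem _ _ (by omega)]
  simp [show xs.length - 1 = n from by omega]

lemma getLastD_mem {α : Type} (xs : List α) (d : α) (h : xs ≠ []) : xs.getLastD d ∈ xs := by
  rw [List.getLastD_eq_getLast?, List.getLast?_eq_some_getLast h, Option.getD_some]
  exact List.getLast_mem h

lemma getD_mem {α : Type} (xs : List α) (n : Nat) (d : α) (h : n < xs.length) : xs.getD n d ∈ xs := by
  rw [List.getD_eq_getElem _ _ h]
  exact List.getElem_mem h

lemma getD_set_self {α : Type} (xs : List α) (n : Nat) (y d : α) (h : n < xs.length) :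
    (xs.set n y).getD n d = y := by
  rw [List.getD_eq_getElem _ _ (by simpa using h)]; simp

lemma getD_set_ne {α : Type} (xs : List α) (n m : Nat) (y d : α) (h : m ≠ n) :
    (xs.set n y).getD m d = xs.getD m d := by
  rw [List.getD_eq_getElem?_getD, List.getElem?_set]
  simp [if_neg (Ne.symm h), List.getD_eq_getElem?_getD]

lemma getD_dropLast {α : Type} (xs : List α) (i : Nat) (d : α) (h : i < xs.length - 1) :
    xs.dropLast.getD i d = xs.getD i d := by
  rw [List.getD_eq_getElem _ _ (by simp; omega), List.getD_eq_getElem _ _ (by omega)]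
  simp [List.getElem_dropLast]

lemma getD_append_length {α : Type} (xs ys : List α) (y : α) (d : α) :
    (xs ++ y :: ys).getD xs.length d = y := by
  rw [List.getD_eq_getElem _ _ (by simp)]
  simp

lemma getD_append_left {α : Type} (xs ys : List α) (i : Nat) (d : α) (h : i < xs.length) :
    (xs ++ ys).getD i d = xs.getD i d := by
  rw [List.getD_eq_getElem _ _ (by simp; omega), List.getD_eq_getElem _ _ h]
  exact List.getElem_append_left h

lemma getD_append_length' {α : Type} (xs ys : List α) (y d : α) (n : Nat) (h : xs.length = n) :
    (xs ++ y :: ys).getD n d = y := by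
  subst h; exact getD_append_length xs ys y d

-- the abstraction: the matrix a boundary state (f, l, rows) denotes
def glue (r : Nat) (f l : List Int) (rows : List (List Int)) : List (List Int) :=
  (List.range r).map (fun i => f.getD i 0 :: rows.getD i [] ++ [l.getD i 0])

-- the shape invariant of A's state
def Shape (r k : Nat) (st : List Int × List Int × List (List Int)) : Prop :=
  st.1.length = r ∧ st.2.1.length = r ∧ st.2.2.length = r ∧ ∀ m ∈ st.2.2, m.length = k

lemma glue_length (r : Nat) (f l : List Int) (rows : List (List Int)) :
    (glue r f l rows).length = r := by simp [glue]

lemma glue_getD (r : Nat) (f l : List Int) (rows : List (List Int)) {i : Nat} (hi : i < r) :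
    (glue r f l rows).getD i [] = f.getD i 0 :: rows.getD i [] ++ [l.getD i 0] := by
  simp [glue, List.getD_eq_getElem?_getD, hi]

-- symbolic reduction of A's Rotate step (multi-row case)
lemma stepA_rot_succ (K : Nat) (a b : Int) (f' l' m : List Int) (rows' : List (List Int))
    (op : String) (hop : ¬ (op == "ShiftRow") = true)
    (hl : l'.length = K + 1) (hrw : rows'.length = K + 1) :
    solStepA (K + 2) (a :: f', b :: l', m :: rows') op =
      (f' ++ [(rows'.getD K [] ++ [l'.getLastD b]).getD 0 0],
       (a :: m).getLastD 0 :: b :: l'.dropLast,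
       (a :: m).dropLast :: rows'.set K ((rows'.getD K [] ++ [l'.getLastD b]).tail)) := by
  have hl' : l' ≠ [] := by intro h; simp [h] at hl
  obtain ⟨c, l'', rfl⟩ := List.exists_cons_of_ne_nil hl'
  have hK : K < rows'.length := by omega
  simp [solStepA, hop, List.getElem?_set_self hK, List.set_set]
  rw [List.getLast?_eq_some_getLast (List.cons_ne_nil c l'')]
  simp

lemma stepA_rot_zero (a b : Int) (m : List Int) (op : String) (hop : ¬ (op == "ShiftRow") = true) :
    solStepA 1 ([a], [b], [m]) op =
      ([((a :: m).dropLast ++ [b]).getD 0 0],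
       [(a :: m).getLastD 0],
       [((a :: m).dropLast ++ [b]).tail]) := by
  simp [solStepA, hop]

lemma shape_step (r k : Nat) (hr : 0 < r) (st : List Int × List Int × List (List Int))
    (op : String) (h : Shape r k st) : Shape r k (solStepA r st op) := by
  obtain ⟨f, l, rows⟩ := st
  obtain ⟨hf, hl, hrows, hw⟩ := h
  simp only at hf hl hrows hw
  have hfne : f ≠ [] := by intro h; simp [h] at hf; omega
  have hlne : l ≠ [] := by intro h; simp [h] at hl; omega
  have hrne : rows ≠ [] := by intro h; simp [h] at hrows; omega
  by_cases hop : (op == "ShiftRow") = true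
  · refine ⟨?_, ?_, ?_, ?_⟩ <;>
      simp [solStepA, hop, List.length_dropLast, hf, hl, hrows]
    · omega
    · omega
    · omega
    · constructor
      · rw [← List.getLastD_eq_getLast?]
        exact hw _ (getLastD_mem _ _ hrne)
      · exact fun x hx => hw _ (List.mem_of_mem_dropLast hx)
  · obtain ⟨a, f', rfl⟩ := List.exists_cons_of_ne_nil hfne
    obtain ⟨b, l', rfl⟩ := List.exists_cons_of_ne_nil hlne
    obtain ⟨m, rows', rfl⟩ := List.exists_cons_of_ne_nil hrne
    simp only [List.length_cons] at hf hl hrows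
    have hmk : m.length = k := hw m (by simp)
    rcases Nat.eq_zero_or_pos rows'.length with h0 | hpos
    · have hr1 : r = 1 := by omega
      subst hr1
      obtain rfl : rows' = [] := List.eq_nil_of_length_eq_zero h0
      obtain rfl : f' = [] := List.eq_nil_of_length_eq_zero (by omega)
      obtain rfl : l' = [] := List.eq_nil_of_length_eq_zero (by omega)
      rw [stepA_rot_zero a b m op hop]
      refine ⟨by simp, by simp, by simp, ?_⟩
      intro x hx
      simp only [List.mem_singleton] at hx
      subst hx
      simp [hmk]
    · obtain ⟨K, hK⟩ : ∃ K, rows'.length = K + 1 := ⟨rows'.length - 1, by omega⟩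
      obtain rfl : r = K + 2 := by omega
      rw [stepA_rot_succ K a b f' l' m rows' op hop (by omega) hK]
      refine ⟨by simp; omega, by simp; omega, by simp; omega, ?_⟩
      intro x hx
      rcases List.mem_cons.mp hx with h1 | h2
      · subst h1; simp [hmk]
      · rcases List.mem_or_eq_of_mem_set h2 with h3 | h3
        · exact hw _ (List.mem_cons_of_mem _ h3)
        · subst h3
          have hrk : (rows'.getD K []).length = k :=
            hw _ (List.mem_cons_of_mem _ (getD_mem rows' K [] (by omega)))
          rw [List.getD_eq_getElem?_getD] at hrk
          simp [List.length_tail, hrk]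

lemma glue_cons (r : Nat) (a b : Int) (f l : List Int) (m : List Int) (rows : List (List Int)) :
    glue (r + 1) (a :: f) (b :: l) (m :: rows) = (a :: m ++ [b]) :: glue r f l rows := by
  simp [glue, List.range_succ_eq_map, List.map_map, Function.comp_def]

lemma glue_concat (r : Nat) (a b : Int) (f l : List Int) (m : List Int) (rows : List (List Int))
    (hf : f.length = r) (hl : l.length = r) (hrw : rows.length = r) :
    glue (r + 1) (f ++ [a]) (l ++ [b]) (rows ++ [m]) = glue r f l rows ++ [a :: m ++ [b]] := by
  have h1 : ∀ i ∈ List.range r,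
      ((f ++ [a]).getD i 0 :: (rows ++ [m]).getD i [] ++ [(l ++ [b]).getD i 0])
        = (f.getD i 0 :: rows.getD i [] ++ [l.getD i 0]) := by
    intro i hi
    rw [List.mem_range] at hi
    rw [getD_append_left _ _ _ _ (by omega), getD_append_left _ _ _ _ (by omega),
        getD_append_left _ _ _ _ (by omega)]
  have h2 : (f ++ [a]).getD r 0 = a := by rw [← hf]; exact getD_append_length f [] a 0
  have h3 : (rows ++ [m]).getD r [] = m := by rw [← hrw]; exact getD_append_length rows [] m []
  have h4 : (l ++ [b]).getD r 0 = b := by rw [← hl]; exact getD_append_length l [] b 0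
  unfold glue
  rw [List.range_succ, List.map_append, List.map_congr_left h1]
  simp only [List.map_cons, List.map_nil, h2, h3, h4]

lemma glue_getElem (r : Nat) (f l : List Int) (rows : List (List Int)) {i : Nat} (hi : i < r)
    (h' : i < (glue r f l rows).length) :
    (glue r f l rows)[i]'h' = f.getD i 0 :: rows.getD i [] ++ [l.getD i 0] := by
  rw [← List.getD_eq_getElem _ ([]) h', glue_getD _ _ _ _ hi]

lemma glue_step_shift (r k : Nat) (hr : 0 < r) (st : List Int × List Int × List (List Int))
    (h : Shape r k st) :
    (glue r st.1 st.2.1 st.2.2).getLastD [] :: (glue r st.1 st.2.1 st.2.2).dropLast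
      = glue r (solStepA r st "ShiftRow").1 (solStepA r st "ShiftRow").2.1 (solStepA r st "ShiftRow").2.2 := by
  obtain ⟨f, l, rows⟩ := st
  obtain ⟨hf, hl, hrows, hw⟩ := h
  simp only at hf hl hrows hw
  obtain ⟨K, hK⟩ : ∃ K, r = K + 1 := ⟨r - 1, by omega⟩
  subst hK
  obtain ⟨f₀, aL, rfl⟩ := (List.eq_nil_or_concat f).resolve_left (by intro h; rw [h] at hf; simp at hf)
  obtain ⟨l₀, bL, rfl⟩ := (List.eq_nil_or_concat l).resolve_left (by intro h; rw [h] at hl; simp at hl)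
  obtain ⟨rows₀, mL, rfl⟩ := (List.eq_nil_or_concat rows).resolve_left (by intro h; rw [h] at hrows; simp at hrows)
  simp only [List.concat_eq_append] at *
  have hf₀ : f₀.length = K := by simpa using hf
  have hl₀ : l₀.length = K := by simpa using hl
  have hr₀ : rows₀.length = K := by simpa using hrows
  have hstep : solStepA (K + 1) (f₀ ++ [aL], l₀ ++ [bL], rows₀ ++ [mL]) "ShiftRow"
      = (aL :: f₀, bL :: l₀, mL :: rows₀) := by
    simp [solStepA]
  rw [hstep, glue_concat K aL bL f₀ l₀ mL rows₀ hf₀ hl₀ hr₀, glue_cons]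
  simp

lemma glue_step_rot (r k : Nat) (hr2 : 2 ≤ r) (st : List Int × List Int × List (List Int))
    (op : String) (hop : ¬ (op == "ShiftRow") = true) (h : Shape r k st) :
    rotB r (k + 2) (glue r st.1 st.2.1 st.2.2)
      = glue r (solStepA r st op).1 (solStepA r st op).2.1 (solStepA r st op).2.2 := by
  obtain ⟨f, l, rows⟩ := st
  obtain ⟨hf, hl, hrows, hw⟩ := h
  simp only at hf hl hrows hw
  have hfne : f ≠ [] := by intro h'; rw [h'] at hf; simp at hf; omega
  have hlne : l ≠ [] := by intro h'; rw [h'] at hl; simp at hl; omega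
  have hrne : rows ≠ [] := by intro h'; rw [h'] at hrows; simp at hrows; omega
  obtain ⟨a, f', rfl⟩ := List.exists_cons_of_ne_nil hfne
  obtain ⟨b, l', rfl⟩ := List.exists_cons_of_ne_nil hlne
  obtain ⟨m, rows', rfl⟩ := List.exists_cons_of_ne_nil hrne
  simp only [List.length_cons] at hf hl hrows
  have hmk : m.length = k := hw m (by simp)
  obtain ⟨K, hK⟩ : ∃ K, rows'.length = K + 1 := ⟨rows'.length - 1, by omega⟩
  obtain rfl : r = K + 2 := by omega
  rw [stepA_rot_succ K a b f' l' m rows' op hop (by omega) hK]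
  have hf' : f'.length = K + 1 := by omega
  have hl' : l'.length = K + 1 := by omega
  have hwj : ∀ j, j < K + 2 → ((m :: rows').getD j []).length = k := by
    intro j hj
    exact hw _ (getD_mem _ j _ (by simp; omega))
  have hglue : ∀ j, j < K + 2 → (glue (K + 2) (a :: f') (b :: l') (m :: rows')).getD j []
      = (a :: f').getD j 0 :: (m :: rows').getD j [] ++ [(b :: l').getD j 0] :=
    fun j hj => glue_getD _ _ _ _ hj
  unfold rotB
  simp only [show k + 2 - 1 = k + 1 from rfl, show k + 2 - 2 = k from rfl,
    show K + 2 - 1 = K + 1 from rfl, show K + 2 - 2 = K from rfl]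
  apply List.ext_getElem
  · simp [glue_length]
  · intro i hL hR
    rw [glue_getElem _ _ _ _ (by rw [glue_length] at hR; exact hR) hR]
    rcases i with _ | j
    · -- top row
      rw [List.getElem_append_left (by simp)]
      simp only [List.getElem_cons_zero]
      rw [hglue 1 (by omega), hglue 0 (by omega)]
      simp only [List.cons_append, List.getD_cons_zero, List.getD_cons_succ]
      rw [getD_append_left f' _ 0 0 (by omega), List.take_succ_cons,
          List.take_append_of_le_length (by omega), List.take_of_length_le (by omega),
          dropLast_concat_getLastD _ _ (List.cons_ne_nil a m)]
    · rcases Nat.lt_or_ge j K with hjK | hjK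
      · -- middle rows
        rw [List.getElem_append_left (by simp; omega)]
        simp only [List.getElem_cons_succ]
        rw [List.getElem_map, List.getElem_range']
        have e1 : 1 + 1 * j = j + 1 := by omega
        simp only [e1]
        rw [hglue (j + 1 + 1) (by omega), hglue (j + 1) (by omega), hglue ((j + 1) - 1) (by omega)]
        simp only [show (j + 1) - 1 = j from rfl, List.cons_append, List.getD_cons_zero,
          List.getD_cons_succ, List.drop_one, List.tail_cons]
        have htk : (rows'.getD j []).length = k := by simpa using hwj (j + 1) (by omega)
        rw [List.take_append_of_le_length (le_of_eq htk.symm),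
            List.take_of_length_le (le_of_eq htk),
            getD_append_left f' _ (j + 1) 0 (by omega),
            getD_set_ne _ K j _ _ (by omega),
            getD_append_length' _ [] _ 0 k (by simpa using hwj j (by omega))]
        rcases j with _ | jj
        · simp
        · simp only [List.getD_cons_succ]
          rw [getD_dropLast l' jj 0 (by omega)]
      · -- bottom row
        have hj : j = K := by rw [glue_length] at hR; omega
        subst hj
        rw [List.getElem_append_right (by simp)]
        simp only [List.length_cons, List.length_map, List.length_range',
          Nat.sub_self, List.getElem_cons_zero]
        rw [hglue (j + 1) (by omega), hglue j (by omega)]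
        simp only [List.cons_append, List.getD_cons_succ, List.tail_cons]
        rw [getD_append_length' _ [] _ 0 k (by simpa using hwj j (by omega)),
            getD_append_length' f' [] _ 0 (j + 1) hf',
            getD_set_self _ j _ _ (by omega),
            ← List.cons_append, getD_zero_cons_tail _ _ (by simp),
            getLastD_eq_getD l' j b 0 hl']
        rcases j with _ | kk
        · simp
        · simp only [List.getD_cons_succ]
          rw [getD_dropLast l' kk 0 (by omega)]

lemma fold_glue (r k : Nat) (hr : 0 < r) (ops : List String)
    (hcase : 2 ≤ r ∨ ∀ op ∈ ops, op = "ShiftRow")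
    (st : List Int × List Int × List (List Int)) (h : Shape r k st) :
    ops.foldl (fun M op => if op == "ShiftRow" then M.getLastD [] :: M.dropLast else rotB r (k + 2) M)
        (glue r st.1 st.2.1 st.2.2)
      = glue r (ops.foldl (solStepA r) st).1 (ops.foldl (solStepA r) st).2.1
          (ops.foldl (solStepA r) st).2.2 := by
  induction ops generalizing st with
  | nil => rfl
  | cons op ops ih =>
    have hcase' : 2 ≤ r ∨ ∀ o ∈ ops, o = "ShiftRow" := by
      rcases hcase with h2 | hall
      · exact Or.inl h2
      · exact Or.inr (fun o ho => hall o (List.mem_cons_of_mem _ ho))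
    simp only [List.foldl_cons]
    by_cases hop : (op == "ShiftRow") = true
    · rw [if_pos hop]
      have := glue_step_shift r k hr st h
      have hop' : op = "ShiftRow" := by simpa using hop
      rw [this, hop'] at *
      exact ih hcase' _ (shape_step r k hr st _ h)
    · have h2 : 2 ≤ r := by
        rcases hcase with h2 | hall
        · exact h2
        · exact absurd (by simpa using hall op (List.mem_cons_self)) hop
      rw [if_neg hop, glue_step_rot r k h2 st op hop h]
      exact ih hcase' _ (shape_step r k hr st op h)

lemma getD_map' {α β : Type} (f : α → β) (xs : List α) (i : Nat) (d : β) (h : i < xs.length) :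
    (xs.map f).getD i d = f (xs[i]'h) := by
  rw [List.getD_eq_getElem _ _ (by simpa using h), List.getElem_map]

lemma slice_eq_drop_take (row : List Int) (cc : Nat) (hcc : 0 < cc) :
    PySem.List.slice row (some 1) (some ((cc : Int) - 1)) = (row.drop 1).take (cc - 2) := by
  have hb2 : (((cc : Int) - 1)).toNat = cc - 1 := by omega
  rw [PySem.List.slice_toNat row (by omega) (by omega), hb2,
      show (1 : Int).toNat = 1 from rfl, show cc - 1 - 1 = cc - 2 from by omega]

lemma init_glue (rc : List (List Int)) (cc : Nat) (hcc : 0 < cc) :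
    glue rc.length (rc.map fun row => row.getD 0 0) (rc.map fun row => row.getD (cc - 1) 0)
        (rc.map fun row => PySem.List.slice row (some 1) (some ((cc : Int) - 1)))
      = rc.map (fun row => row.getD 0 0 :: (row.drop 1).take (cc - 2) ++ [row.getD (cc - 1) 0]) := by
  apply List.ext_getElem
  · simp [glue_length]
  · intro i h1 h2
    rw [glue_getElem _ _ _ _ (by simpa [glue_length] using h1) h1]
    have hi : i < rc.length := by simpa [glue_length] using h1
    rw [getD_map' _ _ _ _ hi, getD_map' _ _ _ _ hi, getD_map' _ _ _ _ hi, List.getElem_map,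
        slice_eq_drop_take _ _ hcc]

lemma slice_len (row : List Int) (cc : Nat) (hcc : 0 < cc) (hle : cc ≤ row.length) :
    (PySem.List.slice row (some 1) (some ((cc : Int) - 1))).length = cc - 2 := by
  rw [slice_eq_drop_take _ _ hcc]
  simp
  omega

-- ===== VERDICT (by name: the statement is the Claim_ definition above) =====
theorem solution_spec : Claim_equal_solution := by
  intro rc operations _hdom hpre
  obtain ⟨hne, hcc, hlen, hdisj⟩ := hpre
  simp only [Spec_solution, solution, solution_alt]
  have hW : ((rc.map (fun row => row.getD 0 0 :: (row.drop 1).take ((rc.getD 0 []).length - 2)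
      ++ [row.getD ((rc.getD 0 []).length - 1) 0])).getD 0 []).length
      = ((rc.getD 0 []).length - 2) + 2 := by
    obtain ⟨hd, tl, rfl⟩ := List.exists_cons_of_ne_nil hne
    simp only [List.map_cons, List.getD_cons_zero]
    simp
    omega
  rw [hW, List.length_map, ← init_glue rc (rc.getD 0 []).length hcc]
  rw [fold_glue rc.length ((rc.getD 0 []).length - 2) (by
        have : rc ≠ [] := hne
        cases rc with | nil => simp at this | cons a t => simp)
      operations hdisj
      (rc.map (fun row => row.getD 0 0), rc.map (fun row => row.getD ((rc.getD 0 []).length - 1) 0),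
       rc.map (fun row => PySem.List.slice row (some 1) (some (((rc.getD 0 []).length : Int) - 1))))
      ⟨by simp, by simp, by simp, ?_⟩]
  · rfl
  · intro mrow hmrow
    simp only [List.mem_map] at hmrow
    obtain ⟨row, hrow, rfl⟩ := hmrow
    exact slice_len row _ hcc (hlen row hrow)
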